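-- pv_equiv track=rewrite | github.com/newearthmartin/trading_bot | bots/ladder_bot.py | is_ladder
-- ===== SOURCE A (Python) =====
-- def is_ladder(last_trades):
--     p0 = None
--     up_down = None
--     for p in last_trades:
--         if p0 and p0 != p:
--             new_up_down = p0 < p
--             if up_down is None:
--                 up_down = new_up_down
--             elif up_down != new_up_down:
--                 return False, None
--         p0 = p
--     return up_down is not None, up_down
-- ===== SOURCE B (Python) =====
-- def is_ladder(last_trades):
--     up = any(p0 < p for p0, p in zip(last_trades, last_trades[1:]) if p0 and p0 != p)
--     down = any(p0 > p for p0, p in zip(last_trades, last_trades[1:]) if p0 and p0 != p)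
--     if up == down:
--         return False, None
--     return True, up
-- ===== Notes on version B (the rewrite author's own statement) =====
-- stated objective: simpler
-- what changed: Replaces A's stateful scan that carries the previous price and a running direction and early-exits on conflict by two independent existence queries ('does any eligible step go up?' / 'does any go down?') combined by a single equality check: equal flags (both or neither) mean no ladder, otherwise the direction is the up flag.
import Mathlib
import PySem

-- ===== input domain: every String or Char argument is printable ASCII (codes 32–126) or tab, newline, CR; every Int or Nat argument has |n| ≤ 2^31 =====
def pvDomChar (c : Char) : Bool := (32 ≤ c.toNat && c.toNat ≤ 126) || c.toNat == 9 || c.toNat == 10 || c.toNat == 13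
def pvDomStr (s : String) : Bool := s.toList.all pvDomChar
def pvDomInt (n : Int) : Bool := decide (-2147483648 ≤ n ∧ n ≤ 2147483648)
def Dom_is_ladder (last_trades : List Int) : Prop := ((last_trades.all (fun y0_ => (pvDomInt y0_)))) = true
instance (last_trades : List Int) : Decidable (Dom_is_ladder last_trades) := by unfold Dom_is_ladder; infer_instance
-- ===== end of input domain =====

-- B replaces A's stateful early-exit scan by two independent existence queries
-- (any step up? any step down?) combined by one equality check; objective: simpler.


-- ===== PORT A =====
-- the for-loop with mutable p0/up_down; `if p0` is Python truthiness: p0 is not None and p0 ≠ 0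
def is_ladder_loop (p0 : Option Int) (up_down : Option Bool) : List Int → Bool × Option Bool
  | [] => (up_down.isSome, up_down)
  | p :: rest =>
    match p0 with
    | some v =>
      if v ≠ 0 ∧ v ≠ p then
        let new_up_down := decide (v < p)
        match up_down with
        | none => is_ladder_loop (some p) (some new_up_down) rest
        | some ud =>
          if ud ≠ new_up_down then (false, none)
          else is_ladder_loop (some p) (some ud) rest
      else is_ladder_loop (some p) up_down rest
    | none => is_ladder_loop (some p) up_down rest

def is_ladder (last_trades : List Int) : Bool × Option Bool :=
  is_ladder_loop none none last_trades

-- ===== PORT B =====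
def is_ladder_alt (last_trades : List Int) : Bool × Option Bool :=
  -- up = any(p0 < p for p0, p in zip(last_trades, last_trades[1:]) if p0 and p0 != p)
  let up := ((last_trades.zip last_trades.tail).filter
      (fun pr => decide (pr.1 ≠ 0 ∧ pr.1 ≠ pr.2))).any (fun pr => decide (pr.1 < pr.2))
  -- down = any(p0 > p for ...)
  let down := ((last_trades.zip last_trades.tail).filter
      (fun pr => decide (pr.1 ≠ 0 ∧ pr.1 ≠ pr.2))).any (fun pr => decide (pr.1 > pr.2))
  if up == down then (false, none) else (true, some up)

-- ===== PRECONDITION & SPEC =====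
def Spec_is_ladder (last_trades : List Int) (out : Bool × Option Bool) : Prop := out = is_ladder_alt last_trades
instance (last_trades : List Int) (out : Bool × Option Bool) : Decidable (Spec_is_ladder last_trades out) := by unfold Spec_is_ladder; infer_instance

-- ===== CLAIM (what is proved, stated in full; the proofs are below) =====
def Claim_equal_is_ladder : Prop := ∀ (last_trades : List Int), Dom_is_ladder last_trades → Spec_is_ladder last_trades (is_ladder last_trades)

-- ===== LEMMAS AND PROOFS =====

-- directions contributed by the rest of A's loop, given the current previous price
def dirsFrom : Option Int → List Int → List Bool
  | _, [] => []
  | p0, p :: rest =>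
    (match p0 with
     | some v => if v ≠ 0 ∧ v ≠ p then [decide (v < p)] else []
     | none => []) ++ dirsFrom (some p) rest

-- A's loop, as a reduce over the collected direction list
def ladderStep : Option Bool → List Bool → Bool × Option Bool
  | ud, [] => (ud.isSome, ud)
  | none, d :: ds => ladderStep (some d) ds
  | some u, d :: ds => if u ≠ d then (false, none) else ladderStep (some u) ds

theorem loop_eq_step : ∀ (xs : List Int) (p0 : Option Int) (ud : Option Bool),
    is_ladder_loop p0 ud xs = ladderStep ud (dirsFrom p0 xs) := by
  intro xs
  induction xs with
  | nil => intro p0 ud; cases ud <;> rfl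
  | cons p rest ih =>
    intro p0 ud
    cases p0 with
    | none => simpa [is_ladder_loop, dirsFrom] using ih (some p) ud
    | some v =>
      by_cases h : v ≠ 0 ∧ v ≠ p
      · cases ud with
        | none => simp [is_ladder_loop, dirsFrom, h, ladderStep, ih]
        | some u =>
          by_cases hu : u ≠ decide (v < p)
          · simp [is_ladder_loop, dirsFrom, h, hu, ladderStep]
          · simp [is_ladder_loop, dirsFrom, h, hu, ladderStep, ih]
      · simp [is_ladder_loop, dirsFrom, h, ih]

theorem zip_any_lt : ∀ (xs : List Int) (a : Int),
    (((a :: xs).zip xs).filter (fun pr => decide (pr.1 ≠ 0 ∧ pr.1 ≠ pr.2))).any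
        (fun pr => decide (pr.1 < pr.2)) = (dirsFrom (some a) xs).any (fun b => b) := by
  intro xs
  induction xs with
  | nil => intro a; rfl
  | cons p rest ih =>
    intro a
    rw [dirsFrom]
    have h2 := ih p
    simp at h2
    by_cases h : a ≠ 0 ∧ a ≠ p <;> simp [h, h2]

theorem zip_any_gt : ∀ (xs : List Int) (a : Int),
    (((a :: xs).zip xs).filter (fun pr => decide (pr.1 ≠ 0 ∧ pr.1 ≠ pr.2))).any
        (fun pr => decide (pr.1 > pr.2)) = (dirsFrom (some a) xs).any (fun b => !b) := by
  intro xs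
  induction xs with
  | nil => intro a; rfl
  | cons p rest ih =>
    intro a
    rw [dirsFrom]
    have h2 := ih p
    simp at h2
    by_cases h : a ≠ 0 ∧ a ≠ p
    · have hne : a ≠ p := h.2
      have hgl : decide (a > p) = !decide (a < p) := by
        by_cases hlt : a < p
        · simp [hlt]; omega
        · simp [hlt]; omega
      simp [h, h2, hgl]
    · simp [h, h2]

theorem step_vs_any : ∀ (ds : List Bool),
    ladderStep none ds =
      if (ds.any (fun b => b)) == (ds.any (fun b => !b)) then (false, none)
      else (true, some (ds.any (fun b => b))) := by
  intro ds
  cases ds with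
  | nil => rfl
  | cons d rest =>
    show ladderStep (some d) rest = _
    induction rest with
    | nil => cases d <;> rfl
    | cons e rest ih =>
      by_cases h : d = e
      · subst h
        have := ih
        cases d <;> simp_all [ladderStep]
      · have h1 : (d :: e :: rest).any (fun b => b) = true := by
          cases d <;> cases e <;> simp_all
        have h2 : (d :: e :: rest).any (fun b => !b) = true := by
          cases d <;> cases e <;> simp_all
        have hne : d ≠ e := h
        simp [ladderStep, hne, h1, h2]

-- ===== VERDICT (by name: the statement is the Claim_ definition above) =====
theorem is_ladder_spec : Claim_equal_is_ladder := by
  intro xs _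
  unfold Spec_is_ladder is_ladder is_ladder_alt
  cases xs with
  | nil => rfl
  | cons a rest =>
    rw [loop_eq_step]
    have hd : dirsFrom none (a :: rest) = dirsFrom (some a) rest := by
      simp [dirsFrom]
    rw [hd]
    simp only [List.tail_cons, zip_any_lt rest a, zip_any_gt rest a]
    exact step_vs_any _
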